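-- pv_equiv track=rewrite | github.com/EbrahimElgharib/Hackerrank-My-Solution | 3 Months Preparation Kit/Week2/Mars Exploration.py | marsExploration
-- ===== SOURCE A (Python) =====
-- def marsExploration(s):
--     # Write your code here
--     len_block = len(s)//3
--
--     result = 0
--
--     for i in range(len_block):
--         x = i*3
--         if s[x] != 'S': result += 1
--         if s[x+1] != 'O': result += 1
--         if s[x+2] != 'S': result += 1
--
--     return result
-- ===== SOURCE B (Python) =====
-- def marsExploration(s):
--     # Count per-residue matches against the repeated signal via strided slices,
--     # then subtract from the compared length.
--     chars = list(s)
--     n3 = len(chars) - len(chars) % 3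
--     body = chars[:n3]
--     return n3 - body[0::3].count('S') - body[1::3].count('O') - body[2::3].count('S')
-- ===== Notes on version B (the rewrite author's own statement) =====
-- stated objective: alternative
-- what changed: Instead of A's index loop testing mismatches block by block, B counts per-residue MATCHES ('S' at offsets 0 and 2, 'O' at offset 1) on three strided slices of the length-3k prefix and subtracts the total from the compared length.
import Mathlib
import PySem

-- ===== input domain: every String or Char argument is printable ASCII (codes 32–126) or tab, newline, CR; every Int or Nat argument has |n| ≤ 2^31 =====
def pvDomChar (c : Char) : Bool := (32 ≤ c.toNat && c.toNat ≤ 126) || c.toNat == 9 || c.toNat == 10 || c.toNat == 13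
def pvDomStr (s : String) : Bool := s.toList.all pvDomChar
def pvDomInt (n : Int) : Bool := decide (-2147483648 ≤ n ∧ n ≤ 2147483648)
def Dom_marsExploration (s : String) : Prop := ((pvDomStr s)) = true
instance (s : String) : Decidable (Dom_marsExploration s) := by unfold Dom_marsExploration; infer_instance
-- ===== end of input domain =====

-- B counts per-residue MATCHES against the repeated signal via three strided slices
-- and subtracts from the compared length, instead of A's per-block mismatch loop; objective: alternative.

-- ===== PORT A =====
def marsExploration (s : String) : Int :=
  let cs := s.toList
  let lenBlock := PySem.Int.floordiv (PySem.Str.len s) 3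
  (PySem.List.pyRange 0 lenBlock 1).foldl (fun result i =>
    let x := i * 3
    -- s[x], s[x+1], s[x+2]: the loop bound guarantees each index is in range, so pyGetD is exact
    let r1 := if PySem.List.pyGetD cs x 'A' ≠ 'S' then result + 1 else result
    let r2 := if PySem.List.pyGetD cs (x + 1) 'A' ≠ 'O' then r1 + 1 else r1
    if PySem.List.pyGetD cs (x + 2) 'A' ≠ 'S' then r2 + 1 else r2) 0

-- ===== PORT B =====
def marsExploration_alt (s : String) : Int :=
  let chars := s.toList
  let n3 : Int := PySem.Str.len s - PySem.Int.mod (PySem.Str.len s) 3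
  let body := PySem.List.slice chars none (some n3)              -- chars[:n3]
  -- body[r::3]: step 3 ≠ 0, so slice? always returns some; .getD [] is exact here
  n3 - ((PySem.List.slice? body (some 0) none 3).getD []).count 'S'
     - ((PySem.List.slice? body (some 1) none 3).getD []).count 'O'
     - ((PySem.List.slice? body (some 2) none 3).getD []).count 'S'

-- ===== PRECONDITION & SPEC =====
def Spec_marsExploration (s : String) (out : Int) : Prop := out = marsExploration_alt s
instance (s : String) (out : Int) : Decidable (Spec_marsExploration s out) := by unfold Spec_marsExploration; infer_instance

-- ===== CLAIM (what is proved, stated in full; the proofs are below) =====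
def Claim_equal_marsExploration : Prop := ∀ (s : String), Dom_marsExploration s → Spec_marsExploration s (marsExploration s)

-- ===== LEMMAS AND PROOFS =====

-- The step-3 slice xs[r::3] of a list of length 3*q (r < 3) picks indices r, r+3, …

theorem mars_slice3 {α : Type} (xs : List α) (q : Nat) (h : xs.length = 3 * q)
    (r : Nat) (hr : r < 3) :
    (PySem.List.slice? xs (some (r : Int)) none 3).getD []
      = (List.range q).filterMap (fun k => xs[r + 3 * k]?) := by
  have hnn : ¬((r : Int) < 0) := by omega
  simp only [PySem.List.slice?, PySem.List.sliceIndices, h]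
  norm_num
  simp only [hnn, if_false]
  rcases Nat.eq_zero_or_pos q with hq0 | hq0
  · subst hq0
    have : min (r : Int) (3 * ((0 : Nat) : Int)) = 0 := by omega
    rw [this]
    norm_num
  · have hmin : min (r : Int) (3 * (q : Int)) = (r : Int) := by omega
    have hlt : (r : Int) < 3 * (q : Int) := by omega
    rw [hmin, if_pos hlt]
    have hcnt : ((3 * (q : Int) - r + 3 - 1) / 3).toNat = q := by omega
    rw [hcnt]
    congr 1

-- A's loop over the first q blocks equals 3*q minus the per-residue match counts.

theorem mars_core (cs : List Char) (q : Nat) (hq : 3 * q ≤ cs.length) :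
    (PySem.List.pyRange 0 (q : Int) 1).foldl (fun result i =>
      let x := i * 3
      let r1 := if PySem.List.pyGetD cs x 'A' ≠ 'S' then result + 1 else result
      let r2 := if PySem.List.pyGetD cs (x + 1) 'A' ≠ 'O' then r1 + 1 else r1
      if PySem.List.pyGetD cs (x + 2) 'A' ≠ 'S' then r2 + 1 else r2) 0 =
    (3 * q : Int)
      - ((List.range q).filterMap (fun k => cs[0 + 3 * k]?)).count 'S'
      - ((List.range q).filterMap (fun k => cs[1 + 3 * k]?)).count 'O'
      - ((List.range q).filterMap (fun k => cs[2 + 3 * k]?)).count 'S' := by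
  induction q with
  | zero => simp [PySem.List.pyRange_one_eq_nil]
  | succ q ih =>
    have hq' : 3 * q ≤ cs.length := by omega
    have h0 : 3 * q < cs.length := by omega
    have h1 : 3 * q + 1 < cs.length := by omega
    have h2 : 3 * q + 2 < cs.length := by omega
    have e0 : PySem.List.pyGetD cs ((q : Int) * 3) 'A' = cs[3 * q] := by
      rw [show ((q : Int) * 3) = ((3 * q : Nat) : Int) by push_cast; ring,
          PySem.List.pyGetD_natCast, List.getD_eq_getElem _ _ h0]
    have e1 : PySem.List.pyGetD cs ((q : Int) * 3 + 1) 'A' = cs[3 * q + 1] := by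
      rw [show ((q : Int) * 3 + 1) = ((3 * q + 1 : Nat) : Int) by push_cast; ring,
          PySem.List.pyGetD_natCast, List.getD_eq_getElem _ _ h1]
    have e2 : PySem.List.pyGetD cs ((q : Int) * 3 + 2) 'A' = cs[3 * q + 2] := by
      rw [show ((q : Int) * 3 + 2) = ((3 * q + 2 : Nat) : Int) by push_cast; ring,
          PySem.List.pyGetD_natCast, List.getD_eq_getElem _ _ h2]
    have g0 : cs[0 + 3 * q]? = some cs[3 * q] := by
      rw [show 0 + 3 * q = 3 * q from by omega, List.getElem?_eq_getElem h0]
    have g1 : cs[1 + 3 * q]? = some cs[3 * q + 1] := by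
      rw [show 1 + 3 * q = 3 * q + 1 from by omega, List.getElem?_eq_getElem h1]
    have g2 : cs[2 + 3 * q]? = some cs[3 * q + 2] := by
      rw [show 2 + 3 * q = 3 * q + 2 from by omega, List.getElem?_eq_getElem h2]
    rw [show ((q + 1 : Nat) : Int) = (q : Int) + 1 by push_cast; ring,
        PySem.List.pyRange_one_succ_right (by positivity), List.foldl_append, ih hq',
        List.range_succ]
    simp only [List.foldl_cons, List.foldl_nil, List.filterMap_append, List.filterMap_cons,
      List.filterMap_nil, g0, g1, g2, List.count_append]
    rw [e0, e1, e2]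
    simp only [List.count_cons, List.count_nil, beq_iff_eq]
    push_cast
    split_ifs <;> first | omega | tauto

-- ===== VERDICT (by name: the statement is the Claim_ definition above) =====
theorem marsExploration_spec : Claim_equal_marsExploration := by
  intro s _
  unfold Spec_marsExploration marsExploration marsExploration_alt
  simp only [PySem.Str.len_eq]
  set cs := s.toList with hcs
  set q := cs.length / 3 with hqdef
  have hq3 : 3 * q ≤ cs.length := by omega
  have hmod : PySem.Int.mod ((cs.length : Nat) : Int) 3 = ((cs.length % 3 : Nat) : Int) :=
    PySem.Int.mod_natCast _ 3
  have hfd : PySem.Int.floordiv ((cs.length : Nat) : Int) 3 = ((q : Nat) : Int) :=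
    PySem.Int.floordiv_natCast _ 3
  have hn3 : ((cs.length : Nat) : Int) - PySem.Int.mod ((cs.length : Nat) : Int) 3
      = ((3 * q : Nat) : Int) := by rw [hmod]; push_cast; omega
  have hbody : PySem.List.slice cs none (some (((cs.length : Nat) : Int)
      - PySem.Int.mod ((cs.length : Nat) : Int) 3)) = cs.take (3 * q) := by
    rw [hn3]; exact PySem.List.slice_to_natCast cs (3 * q)
  have hblen : (cs.take (3 * q)).length = 3 * q := by
    simp [List.length_take]; omega
  have hstr : ∀ r : Nat, r < 3 →
      (PySem.List.slice? (cs.take (3 * q)) (some (r : Int)) none 3).getD []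
        = (List.range q).filterMap (fun k => cs[r + 3 * k]?) := by
    intro r hr
    rw [mars_slice3 (cs.take (3 * q)) q hblen r hr]
    refine List.filterMap_congr ?_
    intro k hk
    rw [List.mem_range] at hk
    exact List.getElem?_take_of_lt (by omega)
  rw [hfd, mars_core cs q hq3, hbody, hn3]
  have h0 := hstr 0 (by omega)
  have h1 := hstr 1 (by omega)
  have h2 := hstr 2 (by omega)
  norm_num at h0 h1 h2 ⊢
  rw [h0, h1, h2]
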